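-- pv_equiv track=rewrite | github.com/Peazfull/the-forge | services/news_brewery/rss_utils.py | merge_article_items
-- ===== SOURCE A (Python) =====
-- from typing import Dict, List
--
-- def merge_article_items(
--     primary: List[Dict[str, str]],
--     secondary: List[Dict[str, str]],
--     limit: int,
-- ) -> List[Dict[str, str]]:
--     # Merge lists without duplicates, keep order (primary first).
--     seen = set()
--     merged: List[Dict[str, str]] = []
--     for group in (primary, secondary):
--         for item in group:
--             url = item.get("url", "")
--             if not url or url in seen:
--                 continue
--             seen.add(url)
--             merged.append(item)
--             if limit and len(merged) >= limit:
--                 return merged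
--     return merged
-- ===== SOURCE B (Python) =====
-- from typing import Dict, List
--
--
-- def merge_article_items(
--     primary: List[Dict[str, str]],
--     secondary: List[Dict[str, str]],
--     limit: int,
-- ) -> List[Dict[str, str]]:
--     # Two staged passes instead of a one-pass seen-set loop: a backward index
--     # pass records each url's FIRST index by plain overwriting (no membership
--     # test, no seen set), then a forward comprehension keeps exactly the items
--     # sitting at their url's first index; the limit is one final slice.
--     items = primary + secondary
--     first_at: Dict[str, int] = {}
--     for i in range(len(items) - 1, -1, -1):
--         url = items[i].get("url", "")
--         if url:
--             first_at[url] = i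
--     merged = [item for i, item in enumerate(items)
--               if first_at.get(item.get("url", ""), -1) == i]
--     return merged[:limit] if limit else merged
-- ===== Notes on version B (the rewrite author's own statement) =====
-- stated objective: alternative
-- what changed: Replaces A's single stateful pass (seen-set + merged-list with an early-return limit check) by two stateless staged passes: a backward pass that records each url's first index by plain overwriting into a dict (no membership test), then a forward comprehension keeping exactly the items that sit at their url's first index, with the limit applied as one final slice.
-- outside the precondition, e.g. on merge_article_items([{'url': 'a'}, {'url': 'b'}], [], -2): A returns [{'url': 'a'}], B returns []
import Mathlib
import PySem

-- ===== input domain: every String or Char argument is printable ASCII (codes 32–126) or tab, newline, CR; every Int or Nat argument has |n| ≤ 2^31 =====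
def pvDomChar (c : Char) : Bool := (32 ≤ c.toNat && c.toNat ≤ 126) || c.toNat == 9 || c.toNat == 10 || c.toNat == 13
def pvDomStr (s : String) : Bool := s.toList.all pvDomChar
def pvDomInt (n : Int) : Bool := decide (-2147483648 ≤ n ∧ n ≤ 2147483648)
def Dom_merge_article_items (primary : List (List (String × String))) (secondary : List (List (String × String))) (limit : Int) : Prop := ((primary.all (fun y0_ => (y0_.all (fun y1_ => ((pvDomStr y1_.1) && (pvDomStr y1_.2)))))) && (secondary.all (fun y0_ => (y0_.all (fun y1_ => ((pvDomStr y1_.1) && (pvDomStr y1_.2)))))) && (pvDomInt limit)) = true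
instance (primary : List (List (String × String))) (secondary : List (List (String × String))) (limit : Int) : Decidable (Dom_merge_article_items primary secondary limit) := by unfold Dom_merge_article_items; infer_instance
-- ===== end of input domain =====

-- B replaces A's single stateful pass (seen-set + merged-list + early-return limit check) by two
-- staged passes: a backward pass recording each url's first index by overwriting into a dict, then
-- a forward comprehension keeping the items at their url's first index, with the limit as one slice.

-- ===== PORT A =====
-- item.get("url", "")
def pvItemUrl (item : List (String × String)) : String :=
  PySem.Dict.getD (PySem.Dict.mk item) "url" ""

-- A's double loop over (primary, secondary): one group at a time; Sum.inr = the early 'return merged'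
def pvAGo (limit : Int) : List (List (String × String)) → PySem.Set String → List (List (String × String)) →
    (PySem.Set String × List (List (String × String))) ⊕ List (List (String × String))
  | [], seen, merged => Sum.inl (seen, merged)
  | item :: rest, seen, merged =>
    let url := pvItemUrl item
    if url = "" ∨ PySem.Set.contains seen url then
      pvAGo limit rest seen merged
    else
      let merged' := merged ++ [item]
      if limit ≠ 0 ∧ limit ≤ (merged'.length : Int) then Sum.inr merged'
      else pvAGo limit rest (PySem.Set.add seen url) merged'

def merge_article_items (primary : List (List (String × String))) (secondary : List (List (String × String))) (limit : Int) : List (List (String × String)) :=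
  match pvAGo limit primary PySem.Set.empty [] with
  | Sum.inr r => r
  | Sum.inl (seen, merged) =>
    match pvAGo limit secondary seen merged with
    | Sum.inr r => r
    | Sum.inl (_, merged2) => merged2

-- ===== PORT B =====
def merge_article_items_alt (primary : List (List (String × String))) (secondary : List (List (String × String))) (limit : Int) : List (List (String × String)) :=
  let items := primary ++ secondary
  -- for i in range(len(items)-1, -1, -1): url = items[i].get("url",""); if url: first_at[url] = i
  let first_at := (PySem.List.pyRange ((items.length : Int) - 1) (-1) (-1)).foldl
      (fun d i =>
        let url := pvItemUrl (PySem.List.pyGetD items i [])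
        if url ≠ "" then d.insert url i else d)
      (PySem.Dict.empty : PySem.Dict String Int)
  -- [item for i, item in enumerate(items) if first_at.get(item.get("url",""), -1) == i]
  let merged := (PySem.List.enumerate items 0).filterMap
      (fun pr => if first_at.getD (pvItemUrl pr.2) (-1) = pr.1 then some pr.2 else none)
  if limit ≠ 0 then PySem.List.slice merged none (some limit) else merged

-- ===== PRECONDITION & SPEC =====
-- Pre_ excludes negative limits (outside the function's natural domain of article counts): there A's
-- '>= limit' early-return accidentally truncates to one item while B's slice drops items from the end,
-- and neither value is specified behaviour.
def Pre_merge_article_items (primary : List (List (String × String))) (secondary : List (List (String × String))) (limit : Int) : Prop := 0 ≤ limit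
instance (primary : List (List (String × String))) (secondary : List (List (String × String))) (limit : Int) : Decidable (Pre_merge_article_items primary secondary limit) := by unfold Pre_merge_article_items; infer_instance

def pvWitness_merge_article_items : (List (List (String × String))) × (List (List (String × String))) × Int :=
  ([[("url", "a"), ("title", "t1")], [("url", "a")]], [[("url", "b")], [("title", "nourl")]], 1)

def Spec_merge_article_items (primary : List (List (String × String))) (secondary : List (List (String × String))) (limit : Int) (out : List (List (String × String))) : Prop := out = merge_article_items_alt primary secondary limit
instance (primary : List (List (String × String))) (secondary : List (List (String × String))) (limit : Int) (out : List (List (String × String))) : Decidable (Spec_merge_article_items primary secondary limit out) := by unfold Spec_merge_article_items; infer_instance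

-- ===== CLAIM (what is proved, stated in full; the proofs are below) =====
def Claim_equal_merge_article_items : Prop := ∀ (primary : List (List (String × String))) (secondary : List (List (String × String))) (limit : Int), Dom_merge_article_items primary secondary limit → Pre_merge_article_items primary secondary limit → Spec_merge_article_items primary secondary limit (merge_article_items primary secondary limit)

-- ===== LEMMAS AND PROOFS =====

-- the limit-free run of A's loop
def pvFull : List (List (String × String)) → PySem.Set String → List (List (String × String)) →
    PySem.Set String × List (List (String × String))
  | [], seen, merged => (seen, merged)
  | item :: rest, seen, merged =>
    let url := pvItemUrl item
    if url = "" ∨ PySem.Set.contains seen url then pvFull rest seen merged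
    else pvFull rest (PySem.Set.add seen url) (merged ++ [item])

-- pvFull's merged component, without the accumulator
def pvSel : List (List (String × String)) → PySem.Set String → List (List (String × String))
  | [], _ => []
  | item :: rest, seen =>
    if pvItemUrl item = "" ∨ PySem.Set.contains seen (pvItemUrl item) then pvSel rest seen
    else item :: pvSel rest (PySem.Set.add seen (pvItemUrl item))

theorem pvFull_eq_sel (items : List (List (String × String))) (seen : PySem.Set String) (merged : List (List (String × String))) :
    (pvFull items seen merged).2 = merged ++ pvSel items seen := by
  induction items generalizing seen merged with
  | nil => simp [pvFull, pvSel]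
  | cons item rest ih =>
    simp only [pvFull, pvSel]
    split
    · exact ih _ _
    · rw [ih]; simp

theorem pvAGo_zero (items : List (List (String × String))) (seen : PySem.Set String) (merged : List (List (String × String))) :
    pvAGo 0 items seen merged = Sum.inl (pvFull items seen merged) := by
  induction items generalizing seen merged with
  | nil => rfl
  | cons item rest ih =>
    simp only [pvAGo, pvFull]
    split
    · exact ih _ _
    · simp only [ne_eq, not_true_eq_false, false_and, if_false]
      exact ih _ _

theorem pvFull_prefix (items : List (List (String × String))) (seen : PySem.Set String) (merged : List (List (String × String))) :
    ∃ t, (pvFull items seen merged).2 = merged ++ t := by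
  induction items generalizing seen merged with
  | nil => exact ⟨[], by simp [pvFull]⟩
  | cons item rest ih =>
    simp only [pvFull]
    split
    · exact ih _ _
    · obtain ⟨t, ht⟩ := ih (PySem.Set.add seen (pvItemUrl item)) (merged ++ [item])
      exact ⟨item :: t, by simpa using ht⟩

theorem pvFull_append (xs ys : List (List (String × String))) (seen : PySem.Set String) (merged : List (List (String × String))) :
    pvFull (xs ++ ys) seen merged = pvFull ys (pvFull xs seen merged).1 (pvFull xs seen merged).2 := by
  induction xs generalizing seen merged with
  | nil => rfl
  | cons item rest ih =>
    simp only [List.cons_append, pvFull]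
    split
    · exact ih _ _
    · exact ih _ _

-- the backward index pass, as a structural recursion: indices k, k+1, … processed LAST to FIRST,
-- so the binding for a url that survives is the smallest index
def pvBIdx : List (List (String × String)) → Int → PySem.Dict String Int
  | [], _ => PySem.Dict.empty
  | item :: rest, k =>
    let d := pvBIdx rest (k + 1)
    if pvItemUrl item ≠ "" then d.insert (pvItemUrl item) k else d

theorem pvBIdx_blank (items : List (List (String × String))) (k : Int) :
    (pvBIdx items k).get? "" = none := by
  induction items generalizing k with
  | nil => simp [pvBIdx, PySem.Dict.get?_empty]
  | cons item rest ih =>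
    simp only [pvBIdx]
    split
    · rename_i h
      rw [PySem.Dict.get?_insert_of_ne _ _ (fun he => h (Eq.symm he))]
      exact ih _
    · exact ih _

-- B's backward pyRange fold equals pvBIdx on the suffix it indexes
theorem pvFold_eq_bIdx (items0 : List (List (String × String))) :
    ∀ (xs : List (List (String × String))) (k : Nat), items0.drop k = xs →
    (PySem.List.pyRange (k : Int) (items0.length : Int) 1).foldr
        (fun i d =>
          let url := pvItemUrl (PySem.List.pyGetD items0 i [])
          if url ≠ "" then d.insert url i else d)
        PySem.Dict.empty = pvBIdx xs (k : Int) := by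
  intro xs
  induction xs with
  | nil =>
    intro k hk
    have hlen : items0.length ≤ k := List.drop_eq_nil_iff.mp hk
    rw [PySem.List.pyRange_one_eq_nil (by exact_mod_cast hlen)]
    rfl
  | cons item rest ih =>
    intro k hk
    have hklt : k < items0.length := by
      by_contra h
      rw [List.drop_eq_nil_of_le (by omega)] at hk
      exact (List.cons_ne_nil _ _) hk.symm
    have hget : items0[k] = item := by
      have := List.drop_eq_getElem_cons (l := items0) hklt
      rw [hk] at this
      exact (List.cons.injEq _ _ _ _ ▸ this).1.symm
    rw [PySem.List.pyRange_one_cons (a := (k : Int)) (b := (items0.length : Int)) (by exact_mod_cast hklt), List.foldr_cons]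
    have hdrop : items0.drop (k + 1) = rest := by
      have := List.drop_eq_getElem_cons (l := items0) hklt
      rw [hk, hget] at this
      exact (List.cons.injEq _ _ _ _ ▸ this.symm).2
    have hrec := ih (k + 1) hdrop
    push_cast at hrec ⊢
    rw [hrec]
    simp only [pvBIdx, PySem.List.pyGetD_natCast, List.getD_eq_getElem?_getD,
      List.getElem?_eq_getElem hklt, Option.getD_some, hget]

-- main bridge: the forward comprehension against the first-index dict equals pvSel
theorem pvFilt_eq_sel (dF : PySem.Dict String Int) :
    ∀ (xs : List (List (String × String))) (k : Int) (seen : PySem.Set String), 0 ≤ k →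
    (∀ u, u ∈ seen → ∃ j, dF.get? u = some j ∧ j < k) →
    (∀ u, u ∉ seen → dF.get? u = (pvBIdx xs k).get? u) →
    (PySem.List.enumerate xs k).filterMap
        (fun pr => if dF.getD (pvItemUrl pr.2) (-1) = pr.1 then some pr.2 else none)
      = pvSel xs seen := by
  intro xs
  induction xs with
  | nil => intro k seen _ _ _; simp [PySem.List.enumerate_nil, pvSel]
  | cons item rest ih =>
    intro k seen hk hseen hsuf
    rw [PySem.List.enumerate_cons, List.filterMap_cons]
    simp only [pvSel]
    by_cases hurl : pvItemUrl item = ""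
    · -- blank url: item skipped on both sides
      have hne : dF.getD (pvItemUrl item) (-1) ≠ k := by
        rw [hurl]
        by_cases hmem : "" ∈ seen
        · obtain ⟨j, hj, hjk⟩ := hseen _ hmem
          rw [PySem.Dict.getD_eq_get?_getD, hj]; simpa using (by omega : j ≠ k)
        · rw [PySem.Dict.getD_eq_get?_getD, hsuf _ hmem, pvBIdx_blank]
          simpa using (by omega : (-1 : Int) ≠ k)
      rw [if_neg hne, if_pos (Or.inl hurl)]
      refine ih (k + 1) seen (by omega) (fun u hu => ?_) (fun u hu => ?_)
      · obtain ⟨j, hj, hjk⟩ := hseen u hu; exact ⟨j, hj, by omega⟩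
      · rw [hsuf u hu]; simp [pvBIdx, hurl]
    · by_cases hmem : pvItemUrl item ∈ seen
      · -- url already taken earlier: its first index is < k
        obtain ⟨j, hj, hjk⟩ := hseen _ hmem
        have hne : dF.getD (pvItemUrl item) (-1) ≠ k := by
          rw [PySem.Dict.getD_eq_get?_getD, hj]; simpa using (by omega : j ≠ k)
        rw [if_neg hne, if_pos (Or.inr ((PySem.Set.contains_iff _ _).mpr hmem))]
        refine ih (k + 1) seen (by omega) (fun u hu => ?_) (fun u hu => ?_)
        · obtain ⟨j', hj', hjk'⟩ := hseen u hu; exact ⟨j', hj', by omega⟩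
        · rw [hsuf u hu]
          simp only [pvBIdx, if_pos (by simpa using hurl)]
          have hune : u ≠ pvItemUrl item := fun he => hu (he ▸ hmem)
          rw [PySem.Dict.get?_insert_of_ne _ _ hune]
      · -- first occurrence: the dict maps this url to exactly k
        have hdk : dF.get? (pvItemUrl item) = some k := by
          rw [hsuf _ hmem]
          simp only [pvBIdx, if_pos (by simpa using hurl)]
          exact PySem.Dict.get?_insert_self _ _ _
        have heq : dF.getD (pvItemUrl item) (-1) = k := by
          rw [PySem.Dict.getD_eq_get?_getD, hdk]; rfl
        have hcon : ¬ (pvItemUrl item = "" ∨ PySem.Set.contains seen (pvItemUrl item)) := by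
          rintro (h | h)
          · exact hurl h
          · exact hmem ((PySem.Set.contains_iff _ _).mp h)
        rw [if_pos heq, if_neg hcon]
        refine congrArg (item :: ·) (ih (k + 1) (PySem.Set.add seen (pvItemUrl item)) (by omega)
          (fun u hu => ?_) (fun u hu => ?_))
        · rcases (PySem.Set.mem_add _ _ _).mp hu with h | h
          · obtain ⟨j, hj, hjk⟩ := hseen u h; exact ⟨j, hj, by omega⟩
          · exact ⟨k, h ▸ hdk, by omega⟩
        · have hu1 : u ∉ seen := fun h => hu ((PySem.Set.mem_add _ _ _).mpr (Or.inl h))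
          have hu2 : u ≠ pvItemUrl item := fun h => hu ((PySem.Set.mem_add _ _ _).mpr (Or.inr h))
          rw [hsuf u hu1]
          simp only [pvBIdx, if_pos (by simpa using hurl)]
          rw [PySem.Dict.get?_insert_of_ne _ _ hu2]

theorem pvA_limit (L : Int) (hL : 0 < L) (items : List (List (String × String)))
    (seen : PySem.Set String) (merged : List (List (String × String)))
    (hlen : (merged.length : Int) < L) :
    pvAGo L items seen merged =
      if L ≤ (((pvFull items seen merged).2.length : Int))
      then Sum.inr ((pvFull items seen merged).2.take L.toNat)
      else Sum.inl (pvFull items seen merged) := by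
  induction items generalizing seen merged with
  | nil =>
    simp only [pvAGo, pvFull]
    rw [if_neg (by omega)]
  | cons item rest ih =>
    simp only [pvAGo, pvFull]
    by_cases hskip : pvItemUrl item = "" ∨ PySem.Set.contains seen (pvItemUrl item)
    · rw [if_pos hskip, if_pos hskip]
      exact ih _ _ hlen
    · rw [if_neg hskip, if_neg hskip]
      by_cases hcut : L ≤ ((merged ++ [item]).length : Int)
      · have hexact : (merged ++ [item]).length = L.toNat := by
          simp only [List.length_append, List.length_cons, List.length_nil]
          simp only [List.length_append, List.length_cons, List.length_nil] at hcut
          push_cast at hcut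
          omega
        rw [if_pos ⟨by omega, hcut⟩]
        obtain ⟨t, ht⟩ := pvFull_prefix rest (PySem.Set.add seen (pvItemUrl item)) (merged ++ [item])
        rw [ht, if_pos (by simp only [List.length_append, List.length_cons, List.length_nil] at hcut ⊢; push_cast at hcut ⊢; omega),
          ← hexact, List.take_left]
      · rw [if_neg (by intro h; exact hcut h.2)]
        refine ih _ _ (by simp only [List.length_append, List.length_cons, List.length_nil] at hcut ⊢; push_cast at hcut ⊢; omega)

-- B's merged list is pvSel over the whole concatenation with an empty seen set
theorem pvB_merged (p s : List (List (String × String))) :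
    (PySem.List.enumerate (p ++ s) 0).filterMap
        (fun pr => if ((PySem.List.pyRange (((p ++ s).length : Int) - 1) (-1) (-1)).foldl
            (fun d i =>
              let url := pvItemUrl (PySem.List.pyGetD (p ++ s) i [])
              if url ≠ "" then d.insert url i else d)
            (PySem.Dict.empty : PySem.Dict String Int)).getD (pvItemUrl pr.2) (-1) = pr.1
          then some pr.2 else none)
      = pvSel (p ++ s) PySem.Set.empty := by
  have hrange : PySem.List.pyRange (((p ++ s).length : Int) - 1) (-1) (-1)
      = (PySem.List.pyRange 0 ((p ++ s).length : Int) 1).reverse := by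
    rw [PySem.List.pyRange_neg_one_eq_reverse]
    norm_num
  rw [hrange, List.foldl_reverse]
  have hfold := pvFold_eq_bIdx (p ++ s) (p ++ s) 0 (by simp)
  push_cast at hfold
  rw [hfold]
  exact pvFilt_eq_sel (pvBIdx (p ++ s) 0) (p ++ s) 0 PySem.Set.empty (by omega)
    (fun u hu => absurd hu (by simp [PySem.Set.empty]))
    (fun u _ => rfl)

-- ===== VERDICT (by name: the statement is the Claim_ definition above) =====
theorem merge_article_items_spec : Claim_equal_merge_article_items := by
  intro p s limit _dom hpre
  unfold Spec_merge_article_items merge_article_items merge_article_items_alt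
  have hvals : (PySem.List.enumerate (p ++ s) 0).filterMap
        (fun pr => if ((PySem.List.pyRange (((p ++ s).length : Int) - 1) (-1) (-1)).foldl
            (fun d i =>
              let url := pvItemUrl (PySem.List.pyGetD (p ++ s) i [])
              if url ≠ "" then d.insert url i else d)
            (PySem.Dict.empty : PySem.Dict String Int)).getD (pvItemUrl pr.2) (-1) = pr.1
          then some pr.2 else none)
      = (pvFull (p ++ s) PySem.Set.empty []).2 := by
    rw [pvB_merged, pvFull_eq_sel]; simp
  rw [pvFull_append] at hvals
  rcases hFp : pvFull p PySem.Set.empty [] with ⟨seen1, merged1⟩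
  rw [hFp] at hvals
  rcases hFs : pvFull s seen1 merged1 with ⟨seen2, merged2⟩
  rw [hFs] at hvals
  dsimp only at hvals ⊢
  by_cases h0 : limit = 0
  · subst h0
    rw [pvAGo_zero, hFp]
    dsimp only
    rw [pvAGo_zero, hFs]
    dsimp only
    simp only [ne_eq, not_true_eq_false, if_false]
    exact hvals.symm
  · have hL : 0 < limit := by unfold Pre_merge_article_items at hpre; omega
    rw [if_pos h0, PySem.List.slice_to _ (le_of_lt hL), hvals]
    rw [pvA_limit limit hL p PySem.Set.empty [] (by simpa using hL), hFp]
    by_cases h1 : limit ≤ ((merged1.length : Int))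
    · rw [if_pos h1]
      dsimp only
      obtain ⟨t, ht⟩ := pvFull_prefix s seen1 merged1
      rw [hFs] at ht
      have ht' : merged2 = merged1 ++ t := ht
      rw [ht']
      rw [List.take_append_of_le_length (by omega)]
    · rw [if_neg h1]
      dsimp only
      rw [pvA_limit limit hL s seen1 merged1 (by omega), hFs]
      by_cases h2 : limit ≤ ((merged2.length : Int))
      · rw [if_pos h2]
      · rw [if_neg h2]
        dsimp only
        rw [List.take_of_length_le (by omega)]
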